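-- pv_equiv track=rewrite | github.com/KWahal/ElectionSimulations | main.py | create_rcv_votes
-- ===== SOURCE A (Python) =====
-- def create_sorted_dict(dict):
--     sorted_values = sorted(dict.values())  # Sort the values
--     sorted_dict = {}
--     for i in sorted_values:
--         for k in dict.keys():
--             if dict[k] == i:
--                 sorted_dict[k] = dict[k]
--                 break
--     return sorted_dict
--
-- def getList(dict):
--     list = []
--     for key in dict.keys():
--         list.append(key)
--
--     return list
--
-- def create_rcv_votes(all_voters_rcv, all_candidates_rcv):
--     ranked_votes = []
--     # have voters_sorted from generate voters function
--     for i in range(len(all_voters_rcv)):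
--         candidate_distance = {}
--         for j in range(len(all_candidates_rcv)):
--             distance = abs(all_voters_rcv[i] - all_candidates_rcv[j])
--             candidate_distance[all_candidates_rcv[j]] = distance
--         #sorted_distances = sorted(candidate_distance.values())
--         # Need to create the same dictionary, sorted by values, and add the keys to a list
--         sorted_distances = create_sorted_dict(candidate_distance)
--         keys = getList(sorted_distances)
--         ranked_votes.append(keys)
--     return ranked_votes
-- ===== SOURCE B (Python) =====
-- def create_rcv_votes(all_voters_rcv, all_candidates_rcv):
--     # One pass per voter: keep the first candidate seen at each distinct distance,
--     # then read the winners off in increasing distance order.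
--     ranked_votes = []
--     for voter in all_voters_rcv:
--         first_at_distance = {}
--         for candidate in all_candidates_rcv:
--             first_at_distance.setdefault(abs(voter - candidate), candidate)
--         ranked_votes.append([first_at_distance[d] for d in sorted(first_at_distance)])
--     return ranked_votes
-- ===== Notes on version B (the rewrite author's own statement) =====
-- stated objective: faster
-- what changed: Per voter, B replaces A's build-candidate-dict + quadratic create_sorted_dict (sort values, then for each value rescan all keys for the first match) by a single pass that setdefaults the first candidate per distinct distance into a dict keyed by distance and then reads winners off the sorted distance keys.
import Mathlib
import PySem

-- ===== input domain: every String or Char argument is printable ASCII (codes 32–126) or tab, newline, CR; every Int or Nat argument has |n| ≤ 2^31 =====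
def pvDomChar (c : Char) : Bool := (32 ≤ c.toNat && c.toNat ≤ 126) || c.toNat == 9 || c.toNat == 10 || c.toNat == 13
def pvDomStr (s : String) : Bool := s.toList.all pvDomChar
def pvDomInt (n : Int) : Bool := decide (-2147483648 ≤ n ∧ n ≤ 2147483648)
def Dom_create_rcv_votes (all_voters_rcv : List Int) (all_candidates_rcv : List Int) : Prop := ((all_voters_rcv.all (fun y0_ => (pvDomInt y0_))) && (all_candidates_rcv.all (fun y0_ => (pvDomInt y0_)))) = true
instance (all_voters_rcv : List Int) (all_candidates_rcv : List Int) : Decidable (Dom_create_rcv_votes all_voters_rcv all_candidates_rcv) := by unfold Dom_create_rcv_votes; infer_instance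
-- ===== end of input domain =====

-- B replaces A's per-voter candidate-dict + quadratic create_sorted_dict (a key re-scan per sorted
-- value) by one setdefault pass keyed by distance plus a sort of the distance keys (objective: faster).

-- ===== PORT A =====
-- inner loop of create_sorted_dict: 'for k in dict.keys(): if dict[k] == i: sorted_dict[k] = dict[k]; break'
-- (Python's dict[k] is exact as getD here: k ranges over d's own keys, so the lookup always succeeds)
def pvCsdInner (d : PySem.Dict Int Int) (i : Int) (sd : PySem.Dict Int Int) :
    List Int → PySem.Dict Int Int
  | [] => sd
  | k :: rest =>
      if d.getD k 0 = i then sd.insert k (d.getD k 0) else pvCsdInner d i sd rest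

def create_sorted_dict (d : PySem.Dict Int Int) : PySem.Dict Int Int :=
  (PySem.List.sorted d.values (fun x => x)).foldl
    (fun sd i => pvCsdInner d i sd d.keys) PySem.Dict.empty

def getList (d : PySem.Dict Int Int) : List Int :=
  d.keys.foldl (fun l k => l ++ [k]) []

def create_rcv_votes (all_voters_rcv : List Int) (all_candidates_rcv : List Int) :
    List (List Int) :=
  (PySem.List.pyRange 0 (PySem.List.len all_voters_rcv)).foldl
    (fun ranked_votes i =>
      let candidate_distance :=
        (PySem.List.pyRange 0 (PySem.List.len all_candidates_rcv)).foldl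
          (fun cd j =>
            cd.insert (PySem.List.pyGetD all_candidates_rcv j 0)
              |PySem.List.pyGetD all_voters_rcv i 0 - PySem.List.pyGetD all_candidates_rcv j 0|)
          PySem.Dict.empty
      ranked_votes ++ [getList (create_sorted_dict candidate_distance)])
    []

-- ===== PORT B =====
-- 'first_at_distance[dist]' is exact as getD: dist ranges over the dict's own keys
def create_rcv_votes_alt (all_voters_rcv : List Int) (all_candidates_rcv : List Int) :
    List (List Int) :=
  all_voters_rcv.foldl
    (fun ranked_votes voter =>
      let fd := all_candidates_rcv.foldl
        (fun fd c => fd.setdefault |voter - c| c) PySem.Dict.empty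
      ranked_votes ++ [(PySem.List.sorted fd.keys (fun x => x)).map (fun dist => fd.getD dist 0)])
    []

-- ===== PRECONDITION & SPEC =====
def Spec_create_rcv_votes (all_voters_rcv : List Int) (all_candidates_rcv : List Int) (out : List (List Int)) : Prop := out = create_rcv_votes_alt all_voters_rcv all_candidates_rcv
instance (all_voters_rcv : List Int) (all_candidates_rcv : List Int) (out : List (List Int)) : Decidable (Spec_create_rcv_votes all_voters_rcv all_candidates_rcv out) := by unfold Spec_create_rcv_votes; infer_instance

-- ===== CLAIM (what is proved, stated in full; the proofs are below) =====
def Claim_equal_create_rcv_votes : Prop := ∀ (all_voters_rcv : List Int) (all_candidates_rcv : List Int), Dom_create_rcv_votes all_voters_rcv all_candidates_rcv → Spec_create_rcv_votes all_voters_rcv all_candidates_rcv (create_rcv_votes all_voters_rcv all_candidates_rcv)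

-- ===== LEMMAS AND PROOFS =====

theorem pv_get?_buildA (f : Int → Int) (cs : List Int) (d0 : PySem.Dict Int Int) (k : Int) :
    (cs.foldl (fun d c => d.insert c (f c)) d0).get? k
      = if k ∈ cs then some (f k) else d0.get? k := by
  induction cs generalizing d0 with
  | nil => simp
  | cons c cs ih =>
    simp only [List.foldl_cons, ih, PySem.Dict.get?_insert, List.mem_cons]
    by_cases h1 : k ∈ cs <;> by_cases h2 : k = c <;> simp [h1, h2]

theorem pv_keys_buildA (f : Int → Int) (cs : List Int) :
    (cs.foldl (fun d c => d.insert c (f c)) PySem.Dict.empty).keys = PySem.List.dedup cs := by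
  rw [PySem.Dict.keys_foldl_insert cs (fun _ c => f c) PySem.Dict.empty,
    PySem.Dict.keys_empty, PySem.Set.update_nil_left, PySem.List.dedup_eq_ofList]

theorem pv_nodup_keys_buildA (f : Int → Int) (cs : List Int) :
    (cs.foldl (fun d c => d.insert c (f c)) PySem.Dict.empty).keys.Nodup := by
  exact PySem.Dict.nodup_keys_foldl_insert cs (fun _ c => f c) _ PySem.Dict.nodup_keys_empty

theorem pv_values_buildA (f : Int → Int) (cs : List Int) :
    (cs.foldl (fun d c => d.insert c (f c)) PySem.Dict.empty).values
      = (PySem.List.dedup cs).map f := by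
  rw [PySem.Dict.values_eq_map_keys _ (pv_nodup_keys_buildA f cs) 0, pv_keys_buildA]
  refine List.map_congr_left (fun k hk => ?_)
  rw [PySem.Dict.getD_eq_get?_getD, pv_get?_buildA]
  simp [(PySem.List.mem_dedup cs k).1 hk]

theorem pv_find?_discard (s : List Int) (x : Int) (p : Int → Bool) (hp : p x = false) :
    (PySem.Set.discard s x).find? p = s.find? p := by
  induction s with
  | nil => rfl
  | cons a s ih =>
    by_cases ha : a = x
    · subst ha; simp [PySem.Set.discard, hp] at *
      exact ih
    · by_cases hpa : p a = true
      · simp [PySem.Set.discard, ha, hpa]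
      · simp only [Bool.not_eq_true] at hpa
        simp [PySem.Set.discard, ha, hpa] at *
        exact ih

theorem pv_find?_dedup (xs : List Int) (p : Int → Bool) :
    (PySem.List.dedup xs).find? p = xs.find? p := by
  induction xs with
  | nil => rfl
  | cons x xs ih =>
    rw [PySem.List.dedup_eq_ofList, PySem.Set.ofList_cons]
    by_cases hp : p x = true
    · simp [hp]
    · simp only [Bool.not_eq_true] at hp
      rw [List.find?_cons, hp, pv_find?_discard _ _ _ hp, ← PySem.List.dedup_eq_ofList, ih,
        List.find?_cons, hp]

theorem pv_dedup_sublist (xs : List Int) : (PySem.List.dedup xs).Sublist xs := by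
  induction xs with
  | nil => simp [PySem.List.dedup]
  | cons x xs ih =>
    rw [PySem.List.dedup_eq_ofList, PySem.Set.ofList_cons]
    have h1 : ((PySem.Set.ofList xs).discard x).Sublist (PySem.Set.ofList xs) := by
      simp only [PySem.Set.discard]; exact List.filter_sublist
    exact List.Sublist.cons₂ x (h1.trans (by rw [← PySem.List.dedup_eq_ofList]; exact ih))


theorem pv_csdInner_eq (D : PySem.Dict Int Int) (f : Int → Int) (i : Int)
    (sd : PySem.Dict Int Int) (ks : List Int) (h : ∀ k ∈ ks, D.getD k 0 = f k) :
    pvCsdInner D i sd ks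
      = match ks.find? (fun k => f k == i) with
        | some k => sd.insert k i
        | none => sd := by
  induction ks with
  | nil => rfl
  | cons k ks ih =>
    have hk : D.getD k 0 = f k := h k (by simp)
    by_cases hi : f k = i
    · simp [pvCsdInner, hk, hi]
    · simp [pvCsdInner, hk, hi, ih (fun k' hk' => h k' (by simp [hk']))]

theorem pv_get?_buildB (f : Int → Int) (cs : List Int) (fd0 : PySem.Dict Int Int) (k : Int) :
    (cs.foldl (fun fd c => fd.setdefault (f c) c) fd0).get? k
      = (fd0.get? k).or (cs.find? (fun c => f c == k)) := by
  induction cs generalizing fd0 with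
  | nil => cases hg : fd0.get? k <;> simp [hg]
  | cons c cs ih =>
    simp only [List.foldl_cons, ih]
    by_cases hc : fd0.contains (f c) = true
    · rw [PySem.Dict.setdefault_of_contains _ _ hc]
      cases hg : fd0.get? k with
      | some v => simp
      | none =>
        have hne : (f c == k) = false := by
          rw [beq_eq_false_iff_ne]
          intro he
          rw [PySem.Dict.contains_eq_isSome_get?, he, hg] at hc
          simp at hc
        simp [hne]
    · rw [PySem.Dict.setdefault_of_not_contains _ _ (by simpa using hc)]
      rw [PySem.Dict.get?_insert]
      have hc' : fd0.contains (f c) = false := by simpa using hc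
      by_cases hk : k = f c
      · have hg : fd0.get? k = none := by
          rw [PySem.Dict.contains_eq_isSome_get?] at hc'
          rw [hk]
          cases h2 : fd0.get? (f c) with
          | none => rfl
          | some v => rw [h2] at hc'; simp at hc'
        rw [hk] at hg
        simp [hk, hg]
      · have hne : (f c == k) = false := by rw [beq_eq_false_iff_ne]; exact fun he => hk he.symm
        simp [hk, hne]

theorem pv_keys_buildB (f : Int → Int) (cs : List Int) :
    (cs.foldl (fun fd c => fd.setdefault (f c) c) PySem.Dict.empty).keys
      = PySem.List.dedup (cs.map f) := by
  rw [PySem.List.dedup_eq_ofList, ← PySem.Set.update_nil_left, ← PySem.Dict.keys_empty (κ := Int) (ν := Int),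
    PySem.Set.update_map_eq_foldl_add]
  generalize PySem.Dict.empty = fd0
  induction cs generalizing fd0 with
  | nil => simp
  | cons c cs ih =>
    simp only [List.foldl_cons, ih]
    congr 1
    by_cases hc : fd0.contains (f c) = true
    · rw [PySem.Dict.setdefault_of_contains _ _ hc, PySem.Set.add_of_mem]
      exact (PySem.Dict.contains_iff_mem_keys _ _).1 hc
    · have hc' : fd0.contains (f c) = false := by simpa using hc
      rw [PySem.Dict.setdefault_of_not_contains _ _ hc',
        PySem.Dict.keys_insert_of_not_contains _ _ hc', PySem.Set.add_of_not_mem]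
      intro hm
      rw [(PySem.Dict.contains_iff_mem_keys _ _).2 hm] at hc
      simp at hc

theorem pv_dedup_sorted (m : List Int) :
    PySem.List.dedup (PySem.List.sorted m (fun x => x))
      = PySem.List.sorted (PySem.List.dedup m) (fun x => x) := by
  apply Eq.symm
  apply PySem.List.sorted_eq_of_perm_of_pairwise_lt
  · rw [List.perm_ext_iff_of_nodup (PySem.List.nodup_dedup _) (PySem.List.nodup_dedup _)]
    intro a
    rw [PySem.List.mem_dedup, PySem.List.mem_dedup, PySem.List.mem_sorted]
  · have hle := (PySem.List.sorted_pairwise m (fun x => x)).sublist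
      (pv_dedup_sublist (PySem.List.sorted m (fun x => x)))
    have hnd := PySem.List.nodup_dedup (PySem.List.sorted m (fun x => x))
    exact (hle.and hnd).imp (fun h => lt_of_le_of_ne h.1 h.2)

theorem pv_dedup_map (g : Int → Int) (xs : List Int)
    (hinj : ∀ a ∈ xs, ∀ b ∈ xs, g a = g b → a = b) :
    PySem.List.dedup (xs.map g) = (PySem.List.dedup xs).map g := by
  induction xs with
  | nil => rfl
  | cons x xs ih =>
    rw [List.map_cons, PySem.List.dedup_eq_ofList, PySem.List.dedup_eq_ofList,
      PySem.Set.ofList_cons, PySem.Set.ofList_cons, List.map_cons]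
    congr 1
    rw [← PySem.List.dedup_eq_ofList, ← PySem.List.dedup_eq_ofList,
      ih (fun a ha b hb => hinj a (by simp [ha]) b (by simp [hb]))]
    simp only [PySem.Set.discard, List.filter_map]
    congr 1
    apply List.filter_congr
    intro y hy
    have hy' : y ∈ xs := (PySem.List.mem_dedup xs y).1 hy
    simp only [Function.comp]
    by_cases he : y = x
    · simp [he]
    · have : ¬ g y = g x := fun hg => he (hinj y (by simp [hy']) x (by simp) hg)
      simp [he, this]



theorem pv_row (f : Int → Int) (cs : List Int) :
    getList (create_sorted_dict (cs.foldl (fun d c => d.insert c (f c)) PySem.Dict.empty))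
      = (PySem.List.sorted
            (cs.foldl (fun fd c => fd.setdefault (f c) c) PySem.Dict.empty).keys
            (fun x => x)).map
          (fun dist => (cs.foldl (fun fd c => fd.setdefault (f c) c) PySem.Dict.empty).getD dist 0) := by
  set D := cs.foldl (fun d c => d.insert c (f c)) PySem.Dict.empty with hD
  set FD := cs.foldl (fun fd c => fd.setdefault (f c) c) PySem.Dict.empty with hFD
  set g : Int → Int := fun i => (cs.find? (fun c => f c == i)).getD 0 with hg
  have hfind : ∀ i, (∃ c ∈ cs, f c = i) →
      ∃ c', cs.find? (fun c => f c == i) = some c' ∧ f c' = i := by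
    rintro i ⟨c, hc, hfc⟩
    have hs : (cs.find? (fun c => f c == i)).isSome := by
      rw [List.find?_isSome]; exact ⟨c, hc, by simp [hfc]⟩
    obtain ⟨c', hc'⟩ := Option.isSome_iff_exists.1 hs
    exact ⟨c', hc', by simpa using List.find?_some hc'⟩
  have hfg : ∀ i, (∃ c ∈ cs, f c = i) → f (g i) = i := by
    intro i hi
    obtain ⟨c', h1, h2⟩ := hfind i hi
    rw [hg]; simp only [h1, Option.getD_some]; exact h2
  have hkeys : D.keys = PySem.List.dedup cs := pv_keys_buildA f cs
  have hvals : D.values = (PySem.List.dedup cs).map f := pv_values_buildA f cs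
  have hDgetD : ∀ k ∈ PySem.List.dedup cs, D.getD k 0 = f k := by
    intro k hk
    rw [hD, PySem.Dict.getD_eq_get?_getD, pv_get?_buildA]
    simp [(PySem.List.mem_dedup cs k).1 hk]
  rw [getList, PySem.List.foldl_append_singleton_eq_self, List.nil_append]
  rw [create_sorted_dict, hvals, hkeys]
  set ds := PySem.List.sorted ((PySem.List.dedup cs).map f) (fun x => x) with hds
  have hmemds : ∀ i ∈ ds, ∃ c ∈ cs, f c = i := by
    intro i hi
    rw [hds, PySem.List.mem_sorted] at hi
    obtain ⟨c, hc, hfc⟩ := List.mem_map.1 hi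
    exact ⟨c, (PySem.List.mem_dedup cs c).1 hc, hfc⟩
  have hcongr : ds.foldl (fun sd i => pvCsdInner D i sd (PySem.List.dedup cs)) PySem.Dict.empty
      = ds.foldl (fun sd i => sd.insert (g i) i) PySem.Dict.empty := by
    apply PySem.List.foldl_congr_mem
    intro sd i hi
    rw [pv_csdInner_eq D f i sd _ hDgetD, pv_find?_dedup]
    obtain ⟨c', h1, h2⟩ := hfind i (hmemds i hi)
    rw [h1, hg]
    simp [h1]
  rw [hcongr, PySem.Dict.keys_foldl_insert_key ds g (fun _ i => i) PySem.Dict.empty,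
    PySem.Dict.keys_empty, PySem.Set.update_nil_left, ← PySem.List.dedup_eq_ofList]
  have hFDkeys : FD.keys = PySem.List.dedup (cs.map f) := pv_keys_buildB f cs
  rw [hFDkeys]
  set ds' := PySem.List.sorted (PySem.List.dedup (cs.map f)) (fun x => x) with hds'
  have hmemds' : ∀ d ∈ ds', ∃ c ∈ cs, f c = d := by
    intro d hd
    rw [hds', PySem.List.mem_sorted, PySem.List.mem_dedup] at hd
    obtain ⟨c, hc, hfc⟩ := List.mem_map.1 hd
    exact ⟨c, hc, hfc⟩
  have hRHS : ds'.map (fun dist => FD.getD dist 0) = ds'.map g := by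
    refine List.map_congr_left (fun d hd => ?_)
    obtain ⟨c', h1, h2⟩ := hfind d (hmemds' d hd)
    rw [PySem.Dict.getD_eq_get?_getD, hFD, pv_get?_buildB, PySem.Dict.get?_empty, hg]
    simp [h1]
  rw [hRHS]
  have hinj : ∀ a ∈ ds, ∀ b ∈ ds, g a = g b → a = b := by
    intro a ha b hb hgab
    rw [← hfg a (hmemds a ha), ← hfg b (hmemds b hb), hgab]
  rw [pv_dedup_map g ds hinj, hds, pv_dedup_sorted]
  congr 1
  apply PySem.List.sorted_eq_sorted_of_perm _ _ _ (fun a b h => h)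
  rw [List.perm_ext_iff_of_nodup (PySem.List.nodup_dedup _) (PySem.List.nodup_dedup _)]
  intro x
  rw [PySem.List.mem_dedup, PySem.List.mem_dedup]
  constructor
  · intro h
    obtain ⟨c, hc, hfc⟩ := List.mem_map.1 h
    exact List.mem_map.2 ⟨c, (PySem.List.mem_dedup cs c).1 hc, hfc⟩
  · intro h
    obtain ⟨c, hc, hfc⟩ := List.mem_map.1 h
    exact List.mem_map.2 ⟨c, (PySem.List.mem_dedup cs c).2 hc, hfc⟩



theorem main_eq (vs cs : List Int) : create_rcv_votes vs cs = create_rcv_votes_alt vs cs := by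
  unfold create_rcv_votes create_rcv_votes_alt
  simp only [PySem.List.foldl_append_singleton_eq_map, List.nil_append]
  have hinner : ∀ v : Int,
      (PySem.List.pyRange 0 (PySem.List.len cs)).foldl
        (fun cd j => cd.insert (PySem.List.pyGetD cs j 0) |v - PySem.List.pyGetD cs j 0|)
        PySem.Dict.empty
      = cs.foldl (fun cd c => cd.insert c |v - c|) PySem.Dict.empty := by
    intro v
    rw [PySem.List.foldl_pyRange_pyGetD cs 0
      (fun cd c => cd.insert c |v - c|) PySem.Dict.empty le_rfl]
    simp
  have hrow : ∀ v : Int,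
      getList (create_sorted_dict (cs.foldl (fun cd c => cd.insert c |v - c|) PySem.Dict.empty))
      = (PySem.List.sorted
            (cs.foldl (fun fd c => fd.setdefault |v - c| c) PySem.Dict.empty).keys
            (fun x => x)).map
          (fun dist => (cs.foldl (fun fd c => fd.setdefault |v - c| c) PySem.Dict.empty).getD dist 0) :=
    fun v => pv_row (fun c => |v - c|) cs
  calc (PySem.List.pyRange 0 (PySem.List.len vs)).map
        (fun i =>
          getList (create_sorted_dict
            ((PySem.List.pyRange 0 (PySem.List.len cs)).foldl
              (fun cd j => cd.insert (PySem.List.pyGetD cs j 0)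
                |PySem.List.pyGetD vs i 0 - PySem.List.pyGetD cs j 0|) PySem.Dict.empty)))
      = ((PySem.List.pyRange 0 (PySem.List.len vs)).map (fun i => PySem.List.pyGetD vs i 0)).map
          (fun v => getList (create_sorted_dict
            (cs.foldl (fun cd c => cd.insert c |v - c|) PySem.Dict.empty))) := by
        rw [List.map_map]
        exact List.map_congr_left (fun i _ => by rw [Function.comp, hinner])
    _ = vs.map (fun v => getList (create_sorted_dict
            (cs.foldl (fun cd c => cd.insert c |v - c|) PySem.Dict.empty))) := by
        rw [PySem.List.map_pyGetD_pyRange_zero]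
    _ = vs.map (fun v =>
          (PySem.List.sorted
            (cs.foldl (fun fd c => fd.setdefault |v - c| c) PySem.Dict.empty).keys
            (fun x => x)).map
          (fun dist => (cs.foldl (fun fd c => fd.setdefault |v - c| c) PySem.Dict.empty).getD dist 0)) :=
        List.map_congr_left (fun v _ => hrow v)

-- ===== VERDICT (by name: the statement is the Claim_ definition above) =====
theorem create_rcv_votes_spec : Claim_equal_create_rcv_votes :=
  fun vs cs _ => main_eq vs cs
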